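-- pv_equiv track=rewrite | github.com/MteaHubHug/BioinformaticsAlgorithms | ALGORITMI U BIOINFORMATICI/BioinformaticsAlgorithms_by_Matea/FragileRegionsInHumanGenome.py | Two_Break_Distance
-- ===== SOURCE A (Python) =====
-- from collections import defaultdict
--
-- def Two_Break_Distance(P, Q):
--     '''Returns the 2-Break Distance of Circular Chromosomes P and Q.'''
--
--     # Construct the break point graph of P and Q.
--     graph = defaultdict(list)
--     for perm_cycle in P+Q:
--         n = len(perm_cycle)
--         for i in range(n):
--             # Add the edge between consecutive items (both orders since the breakpoint graph is undirected).
--             # Note: Modulo n in the higher index for the edge between the last and first elements.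
--             graph[perm_cycle[i]].append(-1*perm_cycle[(i+1) % n])
--             graph[-1*perm_cycle[(i+1) % n]].append(perm_cycle[i])
--
--     # Traverse the breakpoint graph to get the number of connected components.
--     component_count = 0
--     remaining = set(graph.keys())
--     while remaining:
--         component_count += 1
--         queue = {remaining.pop()}  # Undirected graph, so we can choose a remaining node arbitrarily.
--         while queue:
--             # Select an element from the queue and get its remaining children.
--             current = queue.pop()
--             new_nodes = {node for node in graph[current] if node in remaining}
--             # Add the new nodes to the queue, remove them from the remaining nodes.
--             queue |= new_nodes
--             remaining -= new_nodes
--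
--     # Theorem: d(P,Q) = blocks(P,Q) - cycles(P,Q)
--     return sum(map(len,P)) - component_count
-- ===== SOURCE B (Python) =====
-- def Two_Break_Distance(P, Q):
--     '''Returns the 2-Break Distance of Circular Chromosomes P and Q.'''
--     # Edge-driven disjoint-group merging instead of an adjacency dict + BFS:
--     # walk every breakpoint edge once, merging the groups it touches.
--     comps = []  # disjoint groups of breakpoint-graph nodes seen so far
--     for perm_cycle in P + Q:
--         n = len(perm_cycle)
--         for i in range(n):
--             u = perm_cycle[i]
--             v = -perm_cycle[(i + 1) % n]
--             merged = {u, v}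
--             rest = []
--             for c in comps:
--                 if u in c or v in c:
--                     merged |= c
--                 else:
--                     rest.append(c)
--             comps = rest + [merged]
--     return sum(map(len, P)) - len(comps)
-- ===== Notes on version B (the rewrite author's own statement) =====
-- stated objective: alternative
-- what changed: A builds a defaultdict adjacency list of the breakpoint graph and counts connected components by BFS over a 'remaining' set; B never builds the graph: it walks each breakpoint edge once and maintains a list of disjoint node groups, merging the groups the edge touches, the final group count replacing the BFS component count.
import Mathlib
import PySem

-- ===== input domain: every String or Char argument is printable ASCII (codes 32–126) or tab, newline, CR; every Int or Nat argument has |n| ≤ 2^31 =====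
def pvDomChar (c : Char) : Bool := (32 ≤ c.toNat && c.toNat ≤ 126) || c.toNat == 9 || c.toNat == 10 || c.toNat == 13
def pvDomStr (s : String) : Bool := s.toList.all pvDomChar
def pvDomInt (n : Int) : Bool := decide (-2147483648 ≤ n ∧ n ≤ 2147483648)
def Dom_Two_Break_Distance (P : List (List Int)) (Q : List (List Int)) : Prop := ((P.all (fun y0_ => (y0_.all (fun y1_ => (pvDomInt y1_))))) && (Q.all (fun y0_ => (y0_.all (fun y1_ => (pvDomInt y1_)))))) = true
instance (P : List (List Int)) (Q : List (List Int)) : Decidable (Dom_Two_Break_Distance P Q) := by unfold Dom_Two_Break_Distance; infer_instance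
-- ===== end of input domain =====

-- B replaces A's adjacency-dict + BFS component count by edge-driven merging of disjoint
-- node groups (objective: alternative); the returned value is proved identical.

-- ===== PORT A =====
-- graph[perm_cycle[i]].append(-1*perm_cycle[(i+1)%n]); graph[-1*...].append(perm_cycle[i])
def pvGraphAddCycle (g : PySem.Dict Int (List Int)) (perm_cycle : List Int) : PySem.Dict Int (List Int) :=
  (PySem.List.pyRange 0 (perm_cycle.length : Int)).foldl (fun g i =>
    let u := PySem.List.pyGetD perm_cycle i 0
    let v := -1 * PySem.List.pyGetD perm_cycle (PySem.Int.mod (i + 1) (perm_cycle.length : Int)) 0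
    (g.modify u [] (fun l => l ++ [v])).modify v [] (fun l => l ++ [u])) g

-- termination helper for the BFS loop (cited by decreasing_by below)
theorem pvDiffUpdate_length_le (rem q new : List Int) (hnd : new.Nodup)
    (hsub : ∀ x ∈ new, x ∈ rem) :
    (PySem.Set.diff rem new).length + (PySem.Set.update q new).length ≤ rem.length + q.length := by
  have hsplit := (List.length_eq_length_filter_add (l := rem) (fun x => PySem.Set.contains new x)).symm
  have hsp : new.Subperm (rem.filter (fun x => PySem.Set.contains new x)) := by
    apply hnd.subperm
    intro x hx
    exact List.mem_filter.2 ⟨hsub x hx, (PySem.Set.contains_iff _ _).2 hx⟩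
  have hlen1 : new.length ≤ (rem.filter (fun x => PySem.Set.contains new x)).length := hsp.length_le
  have hupd : (PySem.Set.update q new).length ≤ q.length + new.length := by
    rw [PySem.Set.update_eq_append_filter, List.length_append]
    have h1 : (List.filter (fun y => !PySem.Set.contains q y) (PySem.Set.ofList new)).length
        ≤ (PySem.Set.ofList new).length := List.length_filter_le _ _
    have h2 := PySem.Set.length_ofList_le (xs := new)
    omega
  have hdiff : (PySem.Set.diff rem new).length = (rem.filter (fun x => !PySem.Set.contains new x)).length := rfl
  omega

-- inner 'while queue' loop of A; Python's set.pop() takes an arbitrary element, here the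
-- first — the returned component COUNT does not depend on that choice (proved below).
def pvBFS (g : PySem.Dict Int (List Int)) (queue : PySem.Set Int) (remaining : PySem.Set Int) :
    PySem.Set Int :=
  match queue with
  | [] => remaining
  | current :: qrest =>
      let new_nodes : PySem.Set Int :=
        PySem.Set.ofList ((g.getD current []).filter (fun node => PySem.Set.contains remaining node))
      pvBFS g (PySem.Set.update qrest new_nodes) (PySem.Set.diff remaining new_nodes)
termination_by remaining.length + queue.length
decreasing_by
  have h := pvDiffUpdate_length_le remaining qrest
      (PySem.Set.ofList ((g.getD current []).filter (fun node => PySem.Set.contains remaining node)))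
      (PySem.Set.nodup_ofList _)
      (by intro x hx
          have hx' := (PySem.Set.mem_ofList _ _).1 hx
          have := List.of_mem_filter hx'
          exact (PySem.Set.contains_iff _ _).1 this)
  simp only [List.length_cons]
  omega

-- termination helper for the outer 'while remaining' loop (cited by decreasing_by below)
theorem pvBFS_sublist (g : PySem.Dict Int (List Int)) (queue remaining : PySem.Set Int) :
    (pvBFS g queue remaining).Sublist remaining := by
  fun_induction pvBFS with
  | case1 => exact List.Sublist.refl _
  | case2 current qrest remaining new_nodes ih => exact ih.trans List.filter_sublist

-- outer 'while remaining' loop of A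
def pvCount (g : PySem.Dict Int (List Int)) (remaining : PySem.Set Int) : Int :=
  match remaining with
  | [] => 0
  | x :: rest => 1 + pvCount g (pvBFS g [x] rest)
termination_by remaining.length
decreasing_by
  have h := (pvBFS_sublist g [x] rest).length_le
  simp only [List.length_cons]
  omega

def Two_Break_Distance (P : List (List Int)) (Q : List (List Int)) : Int :=
  let graph := (P ++ Q).foldl pvGraphAddCycle PySem.Dict.empty
  let remaining := PySem.Set.ofList graph.keys
  let component_count := pvCount graph remaining
  (P.map (fun c => (c.length : Int))).sum - component_count

-- ===== PORT B =====
-- one edge (u, v): merge every group touching u or v with {u, v}, keep the rest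
def pvMergeEdge (comps : List (PySem.Set Int)) (u v : Int) : List (PySem.Set Int) :=
  let r := comps.foldl (fun acc c =>
      if PySem.Set.contains c u || PySem.Set.contains c v then (PySem.Set.union acc.1 c, acc.2)
      else (acc.1, acc.2 ++ [c]))
    (PySem.Set.ofList [u, v], ([] : List (PySem.Set Int)))
  r.2 ++ [r.1]

def pvMergeCycle (comps : List (PySem.Set Int)) (perm_cycle : List Int) : List (PySem.Set Int) :=
  (PySem.List.pyRange 0 (perm_cycle.length : Int)).foldl (fun comps i =>
    pvMergeEdge comps (PySem.List.pyGetD perm_cycle i 0)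
      (-(PySem.List.pyGetD perm_cycle (PySem.Int.mod (i + 1) (perm_cycle.length : Int)) 0))) comps

def Two_Break_Distance_alt (P : List (List Int)) (Q : List (List Int)) : Int :=
  let comps := (P ++ Q).foldl pvMergeCycle []
  (P.map (fun c => (c.length : Int))).sum - (comps.length : Int)

-- ===== PRECONDITION & SPEC =====
def Spec_Two_Break_Distance (P : List (List Int)) (Q : List (List Int)) (out : Int) : Prop := out = Two_Break_Distance_alt P Q
instance (P : List (List Int)) (Q : List (List Int)) (out : Int) : Decidable (Spec_Two_Break_Distance P Q out) := by unfold Spec_Two_Break_Distance; infer_instance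

-- ===== CLAIM (what is proved, stated in full; the proofs are below) =====
def Claim_equal_Two_Break_Distance : Prop := ∀ (P : List (List Int)) (Q : List (List Int)), Dom_Two_Break_Distance P Q → Spec_Two_Break_Distance P Q (Two_Break_Distance P Q)

-- ===== LEMMAS AND PROOFS =====

-- the breakpoint-graph edge list both programs walk (ghost, proofs only)
def pvCycEdges (c : List Int) : List (Int × Int) :=
  (List.range c.length).map (fun i => (c.getD i 0, -(c.getD ((i + 1) % c.length) 0)))

def pvE (P Q : List (List Int)) : List (Int × Int) := (P ++ Q).flatMap pvCycEdges

def pvStep (E : List (Int × Int)) (u v : Int) : Prop := (u, v) ∈ E ∨ (v, u) ∈ E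

def pvEnd (E : List (Int × Int)) (x : Int) : Prop := ∃ p ∈ E, x = p.1 ∨ x = p.2

def pvGStep (g : PySem.Dict Int (List Int)) (e : Int × Int) : PySem.Dict Int (List Int) :=
  (g.modify e.1 [] (fun l => l ++ [e.2])).modify e.2 [] (fun l => l ++ [e.1])

-- a list of disjoint nonempty blocks, each connected and closed under stp, covering V
def pvIsPartition (stp : Int → Int → Prop) (V : Finset Int) (bs : List (Finset Int)) : Prop :=
  (∀ b ∈ bs, b.Nonempty) ∧
  List.Pairwise (fun b c => ∀ x, x ∈ b → x ∉ c) bs ∧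
  (∀ b ∈ bs, ∀ x ∈ b, ∀ y ∈ b, Relation.ReflTransGen stp x y) ∧
  (∀ b ∈ bs, ∀ x ∈ b, ∀ y, stp x y → y ∈ b) ∧
  (∀ x, x ∈ V ↔ ∃ b ∈ bs, x ∈ b)

-- ---- reshaping the two ports onto the edge list ----

theorem pvGraphAddCycle_eq (g : PySem.Dict Int (List Int)) (c : List Int) :
    pvGraphAddCycle g c = (pvCycEdges c).foldl pvGStep g := by
  unfold pvGraphAddCycle pvCycEdges
  rw [PySem.List.pyRange_zero_natCast, List.foldl_map, List.foldl_map]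
  apply PySem.List.foldl_congr_mem
  intro acc k hk
  have h1 : PySem.List.pyGetD c (↑k) 0 = c.getD k 0 := PySem.List.pyGetD_natCast _ _ _
  have h2 : PySem.List.pyGetD c (PySem.Int.mod ((k : Int) + 1) (c.length : Int)) 0
      = c.getD ((k + 1) % c.length) 0 := by
    have : ((k : Int) + 1) = ((k + 1 : Nat) : Int) := by push_cast; ring
    rw [this, PySem.Int.mod_natCast, PySem.List.pyGetD_natCast]
  simp only [h1, h2, pvGStep, neg_one_mul]

theorem pvGraph_eq (P Q : List (List Int)) :
    (P ++ Q).foldl pvGraphAddCycle PySem.Dict.empty = (pvE P Q).foldl pvGStep PySem.Dict.empty := by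
  unfold pvE
  rw [List.foldl_flatMap]
  apply PySem.List.foldl_congr_mem
  intro acc c _
  exact pvGraphAddCycle_eq acc c

theorem pvMergeCycle_eq (comps : List (PySem.Set Int)) (c : List Int) :
    pvMergeCycle comps c = (pvCycEdges c).foldl (fun cs e => pvMergeEdge cs e.1 e.2) comps := by
  unfold pvMergeCycle pvCycEdges
  rw [PySem.List.pyRange_zero_natCast, List.foldl_map, List.foldl_map]
  apply PySem.List.foldl_congr_mem
  intro acc k hk
  have h1 : PySem.List.pyGetD c (↑k) 0 = c.getD k 0 := PySem.List.pyGetD_natCast _ _ _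
  have h2 : PySem.List.pyGetD c (PySem.Int.mod ((k : Int) + 1) (c.length : Int)) 0
      = c.getD ((k + 1) % c.length) 0 := by
    have : ((k : Int) + 1) = ((k + 1 : Nat) : Int) := by push_cast; ring
    rw [this, PySem.Int.mod_natCast, PySem.List.pyGetD_natCast]
  simp only [h1, h2]

theorem pvComps_eq (P Q : List (List Int)) :
    (P ++ Q).foldl pvMergeCycle [] = (pvE P Q).foldl (fun cs e => pvMergeEdge cs e.1 e.2) [] := by
  unfold pvE
  rw [List.foldl_flatMap]
  apply PySem.List.foldl_congr_mem
  intro acc c _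
  exact pvMergeCycle_eq acc c

-- ---- the built graph's adjacency and keys, in terms of the edge list ----

theorem pvGStep_getD (g : PySem.Dict Int (List Int)) (e : Int × Int) (u y : Int) :
    (y ∈ (pvGStep g e).getD u []) ↔ y ∈ g.getD u [] ∨ (u = e.1 ∧ y = e.2) ∨ (u = e.2 ∧ y = e.1) := by
  obtain ⟨a, b⟩ := e
  unfold pvGStep
  simp only [PySem.Dict.getD_modify]
  split_ifs with h1 h2 h2 <;> simp_all

theorem pvGraph_adj (E : List (Int × Int)) (d : PySem.Dict Int (List Int)) (u y : Int) :
    (y ∈ ((E.foldl pvGStep d).getD u [])) ↔ y ∈ d.getD u [] ∨ pvStep E u y := by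
  induction E generalizing d with
  | nil => simp [pvStep]
  | cons e E ih =>
      rw [List.foldl_cons, ih, pvGStep_getD]
      simp only [pvStep, List.mem_cons, Prod.ext_iff]
      tauto

theorem pvGraph_keys (E : List (Int × Int)) (d : PySem.Dict Int (List Int)) (u : Int) :
    u ∈ (E.foldl pvGStep d).keys ↔ u ∈ d.keys ∨ pvEnd E u := by
  induction E generalizing d with
  | nil => simp [pvEnd]
  | cons e E ih =>
      rw [List.foldl_cons, ih]
      have hk : u ∈ (pvGStep d e).keys ↔ u = e.1 ∨ u = e.2 ∨ u ∈ d.keys := by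
        unfold pvGStep
        rw [PySem.Dict.keys_modify, PySem.Dict.mem_keys_insert,
            PySem.Dict.keys_modify, PySem.Dict.mem_keys_insert]
        tauto
      rw [hk]
      simp only [pvEnd, List.mem_cons]
      constructor
      · rintro ((rfl | rfl | h) | ⟨p, hp, h⟩)
        · exact Or.inr ⟨e, Or.inl rfl, Or.inl rfl⟩
        · exact Or.inr ⟨e, Or.inl rfl, Or.inr rfl⟩
        · exact Or.inl h
        · exact Or.inr ⟨p, Or.inr hp, h⟩
      · rintro (h | ⟨p, (rfl | hp), h⟩)
        · exact Or.inl (Or.inr (Or.inr h))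
        · rcases h with rfl | rfl
          · exact Or.inl (Or.inl rfl)
          · exact Or.inl (Or.inr (Or.inl rfl))
        · exact Or.inr ⟨p, hp, h⟩

-- ---- BFS lemmas ----

theorem pvBFS_sound (g : PySem.Dict Int (List Int)) (queue remaining : PySem.Set Int) :
    ∀ y ∈ remaining, y ∉ pvBFS g queue remaining →
      ∃ q0 ∈ queue, Relation.ReflTransGen (fun a b => b ∈ g.getD a []) q0 y := by
  fun_induction pvBFS with
  | case1 rem => intro y hy hny; exact absurd hy hny
  | case2 rem current qrest new_nodes ih =>
      intro y hy hny
      by_cases hyn : y ∈ new_nodes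
      · refine ⟨current, List.mem_cons_self, Relation.ReflTransGen.single ?_⟩
        have := (PySem.Set.mem_ofList _ _).1 hyn
        exact List.mem_of_mem_filter this
      · have hy' : y ∈ PySem.Set.diff rem new_nodes := (PySem.Set.mem_diff _ _ _).2 ⟨hy, hyn⟩
        obtain ⟨q0, hq0, hconn⟩ := ih y hy' hny
        rcases (PySem.Set.mem_update _ _ _).1 hq0 with hq | hq
        · exact ⟨q0, List.mem_cons_of_mem _ hq, hconn⟩
        · refine ⟨current, List.mem_cons_self, Relation.ReflTransGen.head ?_ hconn⟩
          have := (PySem.Set.mem_ofList _ _).1 hq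
          exact List.mem_of_mem_filter this

theorem pvBFS_closed (g : PySem.Dict Int (List Int)) (queue remaining : PySem.Set Int) :
    ∀ u, (u ∈ queue ∨ (u ∈ remaining ∧ u ∉ pvBFS g queue remaining)) →
      ∀ y ∈ g.getD u [], y ∉ pvBFS g queue remaining := by
  fun_induction pvBFS with
  | case1 rem =>
      intro u hu y hy
      rcases hu with h | ⟨h1, h2⟩
      · simp at h
      · exact absurd h1 h2
  | case2 rem current qrest new_nodes ih =>
      have hres := pvBFS_sublist g (PySem.Set.update qrest new_nodes) (PySem.Set.diff rem new_nodes)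
      rintro u hu y hy
      have hcur : ∀ z ∈ g.getD current [], z ∉ pvBFS g (PySem.Set.update qrest new_nodes) (PySem.Set.diff rem new_nodes) := by
        intro z hz hzres
        have hzdiff : z ∈ PySem.Set.diff rem new_nodes := hres.subset hzres
        have hzrem : z ∈ rem := ((PySem.Set.mem_diff _ _ _).1 hzdiff).1
        have hznot : z ∉ new_nodes := ((PySem.Set.mem_diff _ _ _).1 hzdiff).2
        exact hznot ((PySem.Set.mem_ofList _ _).2 (List.mem_filter.2 ⟨hz, (PySem.Set.contains_iff _ _).2 hzrem⟩))
      rcases hu with hq | ⟨hrem, hnres⟩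
      · rcases List.mem_cons.1 hq with rfl | hq
        · exact hcur y hy
        · exact ih u (Or.inl ((PySem.Set.mem_update _ _ _).2 (Or.inl hq))) y hy
      · by_cases hun : u ∈ new_nodes
        · exact ih u (Or.inl ((PySem.Set.mem_update _ _ _).2 (Or.inr hun))) y hy
        · exact ih u (Or.inr ⟨(PySem.Set.mem_diff _ _ _).2 ⟨hrem, hun⟩, hnres⟩) y hy

theorem pvCount_partition (g : PySem.Dict Int (List Int))
    (hsym : Symmetric (fun a b => b ∈ g.getD a [])) :
    ∀ (n : Nat) (rem : List Int), rem.length ≤ n → rem.Nodup →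
      (∀ u ∈ rem, ∀ y ∈ g.getD u [], y ∈ rem) →
      ∃ bs : List (Finset Int),
        pvIsPartition (fun a b => b ∈ g.getD a []) rem.toFinset bs ∧
        pvCount g rem = (bs.length : Int) := by
  intro n
  induction n with
  | zero =>
      intro rem hlen _ _
      have : rem = [] := List.eq_nil_of_length_eq_zero (Nat.le_zero.1 hlen)
      subst this
      refine ⟨[], ⟨?_, ?_, ?_, ?_, ?_⟩, by simp [pvCount]⟩ <;> simp
  | succ n ih =>
      intro rem hlen hnd hclosed
      match rem with
      | [] => refine ⟨[], ⟨?_, ?_, ?_, ?_, ?_⟩, by simp [pvCount]⟩ <;> simp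
      | x :: rest =>
        set res := pvBFS g [x] rest with hres
        have hsub : res.Sublist rest := pvBFS_sublist g [x] rest
        have hxrest : x ∉ rest := (List.nodup_cons.1 hnd).1
        have hndrest : rest.Nodup := (List.nodup_cons.1 hnd).2
        have hxres : x ∉ res := fun h => hxrest (hsub.subset h)
        -- membership in the removed block
        have hbmem : ∀ u, u ∈ insert x (rest.toFinset \ res.toFinset) ↔ (u = x ∨ u ∈ rest) ∧ u ∉ res := by
          intro u
          simp only [Finset.mem_insert, Finset.mem_sdiff, List.mem_toFinset]
          constructor
          · rintro (rfl | ⟨h1, h2⟩)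
            · exact ⟨Or.inl rfl, hxres⟩
            · exact ⟨Or.inr h1, h2⟩
          · rintro ⟨rfl | h1, h2⟩
            · exact Or.inl rfl
            · exact Or.inr ⟨h1, h2⟩
        set b := insert x (rest.toFinset \ res.toFinset) with hbdef
        -- closedness of res
        have hclosed_res : ∀ u ∈ res, ∀ y ∈ g.getD u [], y ∈ res := by
          intro u hu y hy
          have hurest : u ∈ rest := hsub.subset hu
          have hyrem : y ∈ x :: rest := hclosed u (List.mem_cons_of_mem _ hurest) y hy
          by_contra hyres
          have hynotx : ∀ z, z ∈ ({x} : List Int) ∨ (z ∈ rest ∧ z ∉ res) → ∀ w ∈ g.getD z [], w ∉ res := by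
            intro z hz
            apply pvBFS_closed g [x] rest z
            rcases hz with h | h
            · exact Or.inl h
            · exact Or.inr h
          -- y is x or in rest; in both cases y's neighbours are out of res; u is a neighbour of y
          have hyu : u ∈ g.getD y [] := hsym hy
          have : u ∉ res := by
            rcases List.mem_cons.1 hyrem with rfl | hyrest
            · exact hynotx y (Or.inl (List.mem_singleton.2 rfl)) u hyu
            · exact hynotx y (Or.inr ⟨hyrest, hyres⟩) u hyu
          exact this hu
        have hih := ih res (by have := hsub.length_le; have : rest.length ≤ n := Nat.le_of_succ_le_succ hlen; omega)
            (hndrest.sublist hsub) hclosed_res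
        obtain ⟨bs', ⟨hne', hdisj', hconn', hcl', hcov'⟩, hcnt'⟩ := hih
        -- connectivity from x to block members
        have hconnx : ∀ u ∈ b, Relation.ReflTransGen (fun a b => b ∈ g.getD a []) x u := by
          intro u hu
          obtain ⟨h1, h2⟩ := (hbmem u).1 hu
          rcases h1 with rfl | h1
          · exact Relation.ReflTransGen.refl
          · obtain ⟨q0, hq0, hc⟩ := pvBFS_sound g [x] rest u h1 h2
            rcases List.mem_singleton.1 hq0 with rfl
            exact hc
        refine ⟨b :: bs', ⟨?_, ?_, ?_, ?_, ?_⟩, ?_⟩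
        · intro c hc
          rcases List.mem_cons.1 hc with rfl | hc
          · exact ⟨x, (hbmem x).2 ⟨Or.inl rfl, hxres⟩⟩
          · exact hne' c hc
        · refine List.pairwise_cons.2 ⟨?_, hdisj'⟩
          intro c hc u hub huc
          have hcres : u ∈ res.toFinset := by
            have := (hcov' u).2 ⟨c, hc, huc⟩
            exact this
          exact ((hbmem u).1 hub).2 (List.mem_toFinset.1 hcres)
        · intro c hc
          rcases List.mem_cons.1 hc with rfl | hc
          · intro p hp q hq
            exact ((Relation.ReflTransGen.symmetric hsym) (hconnx p hp)).trans (hconnx q hq)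
          · exact hconn' c hc
        · intro c hc
          rcases List.mem_cons.1 hc with rfl | hc
          · intro p hp y hy
            have hyrem : y ∈ x :: rest := hclosed p (List.mem_cons.2 ((hbmem p).1 hp).1) y hy
            have hynres : y ∉ res := by
              apply pvBFS_closed g [x] rest p _ y hy
              rcases (hbmem p).1 hp with ⟨rfl | h1, h2⟩
              · exact Or.inl (List.mem_singleton.2 rfl)
              · exact Or.inr ⟨h1, h2⟩
            exact (hbmem y).2 ⟨List.mem_cons.1 hyrem, hynres⟩
          · exact hcl' c hc
        · intro u
          simp only [List.mem_toFinset, List.mem_cons]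
          constructor
          · rintro (rfl | hu)
            · exact ⟨b, Or.inl rfl, (hbmem u).2 ⟨Or.inl rfl, hxres⟩⟩
            · by_cases hur : u ∈ res
              · obtain ⟨c, hc, huc⟩ := (hcov' u).1 (List.mem_toFinset.2 hur)
                exact ⟨c, Or.inr hc, huc⟩
              · exact ⟨b, Or.inl rfl, (hbmem u).2 ⟨Or.inr hu, hur⟩⟩
          · rintro ⟨c, rfl | hc, huc⟩
            · rcases ((hbmem u).1 huc).1 with rfl | h
              · exact Or.inl rfl
              · exact Or.inr h
            · have hures : u ∈ res := List.mem_toFinset.1 ((hcov' u).2 ⟨c, hc, huc⟩)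
              exact Or.inr (hsub.subset hures)
        · rw [pvCount]
          rw [← hres, hcnt']
          simp [List.length_cons]
          ring

-- ---- uniqueness of the component partition ----

theorem pvPartition_walk {stp : Int → Int → Prop} {b : Finset Int} {x y : Int}
    (hcl : ∀ x ∈ b, ∀ y, stp x y → y ∈ b) (hx : x ∈ b)
    (hconn : Relation.ReflTransGen stp x y) : y ∈ b := by
  induction hconn with
  | refl => exact hx
  | tail hab hstep ih => exact hcl _ ih _ hstep

theorem pvPartition_mem {stp : Int → Int → Prop} {V : Finset Int} {bs1 bs2 : List (Finset Int)}
    (h1 : pvIsPartition stp V bs1) (h2 : pvIsPartition stp V bs2) :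
    ∀ b ∈ bs1, b ∈ bs2 := by
  obtain ⟨hne1, _, hco1, hcl1, hcov1⟩ := h1
  obtain ⟨_, _, hco2, hcl2, hcov2⟩ := h2
  intro b hb
  obtain ⟨x, hx⟩ := hne1 b hb
  have hxV : x ∈ V := (hcov1 x).2 ⟨b, hb, hx⟩
  obtain ⟨c, hc, hxc⟩ := (hcov2 x).1 hxV
  have : b = c := by
    ext y
    constructor
    · intro hy
      exact pvPartition_walk (hcl2 c hc) hxc (hco1 b hb x hx y hy)
    · intro hy
      exact pvPartition_walk (hcl1 b hb) hx (hco2 c hc x hxc y hy)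
  exact this ▸ hc

theorem pvPartition_nodup {stp : Int → Int → Prop} {V : Finset Int} {bs : List (Finset Int)}
    (h : pvIsPartition stp V bs) : bs.Nodup := by
  obtain ⟨hne, hdisj, _, _, _⟩ := h
  refine hdisj.imp_of_mem ?_
  intro b c hb hc hbc
  obtain ⟨x, hx⟩ := hne b hb
  intro he
  exact (hbc x hx) (he ▸ hx)

theorem pvPartition_length_eq {stp : Int → Int → Prop} {V : Finset Int} {bs1 bs2 : List (Finset Int)}
    (h1 : pvIsPartition stp V bs1) (h2 : pvIsPartition stp V bs2) :
    bs1.length = bs2.length := by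
  have hn1 := pvPartition_nodup h1
  have hn2 := pvPartition_nodup h2
  have hperm : bs1.Perm bs2 := by
    apply List.perm_ext_iff_of_nodup hn1 hn2 |>.2
    intro b
    exact ⟨fun hb => pvPartition_mem h1 h2 b hb, fun hb => pvPartition_mem h2 h1 b hb⟩
  exact hperm.length_eq

-- ---- B-side invariant ----

def pvInv (Efull done : List (Int × Int)) (comps : List (PySem.Set Int)) : Prop :=
  (∀ c ∈ comps, c ≠ []) ∧
  List.Pairwise (fun b c => ∀ x, x ∈ b → x ∉ c) comps ∧
  (∀ c ∈ comps, ∀ x ∈ c, ∀ y ∈ c, Relation.ReflTransGen (pvStep Efull) x y) ∧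
  (∀ p ∈ done, ∃ c ∈ comps, p.1 ∈ c ∧ p.2 ∈ c) ∧
  (∀ x, (∃ c ∈ comps, x ∈ c) ↔ pvEnd done x)

theorem pvMergeEdge_snd (u v : Int) (comps : List (PySem.Set Int))
    (m0 : PySem.Set Int) (acc0 : List (PySem.Set Int)) :
    (comps.foldl (fun acc c =>
      if PySem.Set.contains c u || PySem.Set.contains c v then (PySem.Set.union acc.1 c, acc.2)
      else (acc.1, acc.2 ++ [c])) (m0, acc0)).2
      = acc0 ++ comps.filter (fun c => !(PySem.Set.contains c u || PySem.Set.contains c v)) := by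
  induction comps generalizing m0 acc0 with
  | nil => simp
  | cons c comps ih =>
      rw [List.foldl_cons]
      by_cases h : (PySem.Set.contains c u || PySem.Set.contains c v) = true
      · rw [if_pos h, ih, List.filter_cons_of_neg (by simp only [Bool.not_eq_true', Bool.not_eq_false]; exact h)]
      · rw [if_neg h, ih, List.filter_cons_of_pos (by simp only [Bool.not_eq_true']; exact Bool.eq_false_iff.2 h)]
        simp

theorem pvMergeEdge_fst (u v : Int) (comps : List (PySem.Set Int))
    (m0 : PySem.Set Int) (acc0 : List (PySem.Set Int)) (x : Int) :
    (x ∈ (comps.foldl (fun acc c =>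
      if PySem.Set.contains c u || PySem.Set.contains c v then (PySem.Set.union acc.1 c, acc.2)
      else (acc.1, acc.2 ++ [c])) (m0, acc0)).1)
      ↔ x ∈ m0 ∨ ∃ c ∈ comps, (PySem.Set.contains c u || PySem.Set.contains c v) = true ∧ x ∈ c := by
  induction comps generalizing m0 acc0 with
  | nil => simp
  | cons c comps ih =>
      rw [List.foldl_cons]
      by_cases h : (PySem.Set.contains c u || PySem.Set.contains c v) = true
      · rw [if_pos h, ih, PySem.Set.mem_union]
        simp only [List.mem_cons]
        constructor
        · rintro ((hm | hc) | ⟨c', hc', ht, hx⟩)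
          · exact Or.inl hm
          · exact Or.inr ⟨c, Or.inl rfl, h, hc⟩
          · exact Or.inr ⟨c', Or.inr hc', ht, hx⟩
        · rintro (hm | ⟨c', rfl | hc', ht, hx⟩)
          · exact Or.inl (Or.inl hm)
          · exact Or.inl (Or.inr hx)
          · exact Or.inr ⟨c', hc', ht, hx⟩
      · rw [if_neg h, ih]
        simp only [List.mem_cons]
        constructor
        · rintro (hm | ⟨c', hc', ht, hx⟩)
          · exact Or.inl hm
          · exact Or.inr ⟨c', Or.inr hc', ht, hx⟩
        · rintro (hm | ⟨c', rfl | hc', ht, hx⟩)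
          · exact Or.inl hm
          · exact absurd ht h
          · exact Or.inr ⟨c', hc', ht, hx⟩

theorem pvStep_symm (E : List (Int × Int)) : Symmetric (pvStep E) := by
  intro a b h
  exact h.elim Or.inr Or.inl

theorem pvInv_step (Efull done : List (Int × Int)) (comps : List (PySem.Set Int)) (u v : Int)
    (hmem : (u, v) ∈ Efull) (hinv : pvInv Efull done comps) :
    pvInv Efull (done ++ [(u, v)]) (pvMergeEdge comps u v) := by
  obtain ⟨h1, h2, h3, h4, h5⟩ := hinv
  have hRsymm := Relation.ReflTransGen.symmetric (pvStep_symm Efull)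
  set M := (comps.foldl (fun acc c =>
      if PySem.Set.contains c u || PySem.Set.contains c v then (PySem.Set.union acc.1 c, acc.2)
      else (acc.1, acc.2 ++ [c]))
    (PySem.Set.ofList [u, v], ([] : List (PySem.Set Int)))).1 with hMdef
  have hsplit : pvMergeEdge comps u v
      = comps.filter (fun c => !(PySem.Set.contains c u || PySem.Set.contains c v)) ++ [M] := by
    simp only [pvMergeEdge]
    rw [pvMergeEdge_snd]
    rw [List.nil_append]
  have hMmem : ∀ x, x ∈ M ↔ x = u ∨ x = v ∨
      ∃ c ∈ comps, (PySem.Set.contains c u || PySem.Set.contains c v) = true ∧ x ∈ c := by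
    intro x
    rw [hMdef, pvMergeEdge_fst]
    rw [PySem.Set.mem_ofList]
    simp only [List.mem_cons, List.not_mem_nil, or_false]
    tauto
  have htouch : ∀ c, (PySem.Set.contains c u || PySem.Set.contains c v) = true ↔ u ∈ c ∨ v ∈ c := by
    intro c
    rw [Bool.or_eq_true, PySem.Set.contains_iff, PySem.Set.contains_iff]
  have hdisjF : ∀ c ∈ comps, ∀ c' ∈ comps, c ≠ c' → ∀ x ∈ c, x ∉ c' := by
    have hsymR : Symmetric (fun b c : PySem.Set Int => ∀ x, x ∈ b → x ∉ c) := by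
      intro b c h x hxc hxb
      exact h x hxb hxc
    intro c hc c' hc' hne x hx
    exact (h2.forall hsymR) hc hc' hne x hx
  -- connectivity of every member of M to u
  have hconnu : ∀ x ∈ M, Relation.ReflTransGen (pvStep Efull) u x := by
    intro x hx
    rcases (hMmem x).1 hx with rfl | rfl | ⟨c, hc, ht, hxc⟩
    · exact Relation.ReflTransGen.refl
    · exact Relation.ReflTransGen.single (r := pvStep Efull) (Or.inl hmem)
    · rcases (htouch c).1 ht with hu | hv
      · exact h3 c hc u hu x hxc
      · exact (Relation.ReflTransGen.single (r := pvStep Efull) (Or.inl hmem)).trans (h3 c hc v hv x hxc)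
  rw [hsplit]
  refine ⟨?_, ?_, ?_, ?_, ?_⟩
  · intro c hc
    rcases List.mem_append.1 hc with hc | hc
    · exact h1 c (List.mem_of_mem_filter hc)
    · rw [List.mem_singleton.1 hc]
      exact List.ne_nil_of_mem ((hMmem u).2 (Or.inl rfl))
  · rw [List.pairwise_append]
    refine ⟨List.Pairwise.sublist List.filter_sublist h2, List.pairwise_singleton _ _, ?_⟩
    intro c hc m hm x hxc
    rcases List.mem_singleton.1 hm with rfl
    intro hxm
    have hcmem := List.mem_of_mem_filter hc
    have hcuntouch : ¬ ((PySem.Set.contains c u || PySem.Set.contains c v) = true) := by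
      have := List.of_mem_filter hc
      simp only [Bool.not_eq_true'] at this
      intro hkk
      rw [this] at hkk
      exact Bool.false_ne_true hkk
    rcases (hMmem x).1 hxm with rfl | rfl | ⟨c', hc', ht, hxc'⟩
    · exact hcuntouch ((htouch c).2 (Or.inl hxc))
    · exact hcuntouch ((htouch c).2 (Or.inr hxc))
    · have hne : c ≠ c' := fun he => hcuntouch (he ▸ ht)
      exact hdisjF c hcmem c' hc' hne x hxc hxc'
  · intro c hc
    rcases List.mem_append.1 hc with hc | hc
    · exact h3 c (List.mem_of_mem_filter hc)
    · rcases List.mem_singleton.1 hc with rfl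
      intro x hx y hy
      exact (hRsymm (hconnu x hx)).trans (hconnu y hy)
  · intro p hp
    rcases List.mem_append.1 hp with hp | hp
    · obtain ⟨c, hc, hp1, hp2⟩ := h4 p hp
      by_cases ht : (PySem.Set.contains c u || PySem.Set.contains c v) = true
      · refine ⟨M, List.mem_append.2 (Or.inr (List.mem_singleton.2 rfl)), ?_, ?_⟩
        · exact (hMmem p.1).2 (Or.inr (Or.inr ⟨c, hc, ht, hp1⟩))
        · exact (hMmem p.2).2 (Or.inr (Or.inr ⟨c, hc, ht, hp2⟩))
      · refine ⟨c, List.mem_append.2 (Or.inl (List.mem_filter.2 ⟨hc, by simp only [Bool.not_eq_true']; exact Bool.eq_false_iff.2 ht⟩)), hp1, hp2⟩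
    · rcases List.mem_singleton.1 hp with rfl
      exact ⟨M, List.mem_append.2 (Or.inr (List.mem_singleton.2 rfl)),
        (hMmem u).2 (Or.inl rfl), (hMmem v).2 (Or.inr (Or.inl rfl))⟩
  · intro x
    constructor
    · rintro ⟨c, hc, hxc⟩
      rcases List.mem_append.1 hc with hc | hc
      · obtain ⟨p, hp, hx⟩ := (h5 x).1 ⟨c, List.mem_of_mem_filter hc, hxc⟩
        exact ⟨p, List.mem_append.2 (Or.inl hp), hx⟩
      · rcases List.mem_singleton.1 hc with rfl
        rcases (hMmem x).1 hxc with rfl | rfl | ⟨c', hc', ht, hxc'⟩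
        · exact ⟨(x, v), List.mem_append.2 (Or.inr (List.mem_singleton.2 rfl)), Or.inl rfl⟩
        · exact ⟨(u, x), List.mem_append.2 (Or.inr (List.mem_singleton.2 rfl)), Or.inr rfl⟩
        · obtain ⟨p, hp, hx⟩ := (h5 x).1 ⟨c', hc', hxc'⟩
          exact ⟨p, List.mem_append.2 (Or.inl hp), hx⟩
    · rintro ⟨p, hp, hx⟩
      rcases List.mem_append.1 hp with hp | hp
      · obtain ⟨c, hc, hxc⟩ := (h5 x).2 ⟨p, hp, hx⟩
        by_cases ht : (PySem.Set.contains c u || PySem.Set.contains c v) = true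
        · exact ⟨M, List.mem_append.2 (Or.inr (List.mem_singleton.2 rfl)),
            (hMmem x).2 (Or.inr (Or.inr ⟨c, hc, ht, hxc⟩))⟩
        · exact ⟨c, List.mem_append.2 (Or.inl (List.mem_filter.2 ⟨hc, by simp only [Bool.not_eq_true']; exact Bool.eq_false_iff.2 ht⟩)), hxc⟩
      · rcases List.mem_singleton.1 hp with rfl
        refine ⟨M, List.mem_append.2 (Or.inr (List.mem_singleton.2 rfl)), ?_⟩
        rcases hx with rfl | rfl
        · exact (hMmem x).2 (Or.inl rfl)
        · exact (hMmem x).2 (Or.inr (Or.inl rfl))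

theorem pvInv_foldl (Efull : List (Int × Int)) :
    ∀ (E done : List (Int × Int)) (comps : List (PySem.Set Int)),
      pvInv Efull done comps → (∀ p ∈ E, p ∈ Efull) →
      pvInv Efull (done ++ E) (E.foldl (fun cs e => pvMergeEdge cs e.1 e.2) comps) := by
  intro E
  induction E with
  | nil => intro done comps h _; simpa using h
  | cons e E ih =>
      intro done comps h hE
      have h1 := pvInv_step Efull done comps e.1 e.2 (by simpa using hE e List.mem_cons_self) h
      have h2 := ih (done ++ [(e.1, e.2)]) (pvMergeEdge comps e.1 e.2) h1
          (fun p hp => hE p (List.mem_cons_of_mem _ hp))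
      simpa [List.append_assoc] using h2

-- ---- final assembly ----

theorem pvMain (P Q : List (List Int)) :
    pvCount ((P ++ Q).foldl pvGraphAddCycle PySem.Dict.empty)
      (PySem.Set.ofList ((P ++ Q).foldl pvGraphAddCycle PySem.Dict.empty).keys)
      = (((P ++ Q).foldl pvMergeCycle []).length : Int) := by
  rw [pvGraph_eq, pvComps_eq]
  set E := pvE P Q with hE
  set g := E.foldl pvGStep PySem.Dict.empty with hg
  set comps := E.foldl (fun cs e => pvMergeEdge cs e.1 e.2) [] with hcomps
  -- adjacency of the built graph is exactly the edge relation
  have hadj : ∀ u y, (y ∈ g.getD u []) ↔ pvStep E u y := by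
    intro u y
    rw [hg, pvGraph_adj, PySem.Dict.getD_empty]
    simp
  have hstep_eq : (fun a b => b ∈ g.getD a []) = pvStep E := by
    funext a b
    exact propext (hadj a b)
  have hsym : Symmetric (fun a b => b ∈ g.getD a []) := by
    rw [hstep_eq]
    exact pvStep_symm E
  have hkeys : ∀ u, u ∈ g.keys ↔ pvEnd E u := by
    intro u
    rw [hg, pvGraph_keys, PySem.Dict.keys_empty]
    simp
  have hstep_end : ∀ u y, pvStep E u y → pvEnd E y := by
    rintro u y (h | h)
    · exact ⟨(u, y), h, Or.inr rfl⟩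
    · exact ⟨(y, u), h, Or.inl rfl⟩
  set rem := PySem.Set.ofList g.keys with hrem
  have hremmem : ∀ u, u ∈ rem ↔ pvEnd E u := by
    intro u
    rw [hrem, PySem.Set.mem_ofList]
    exact hkeys u
  -- A-side partition
  obtain ⟨bsA, hpartA, hcntA⟩ := pvCount_partition g hsym rem.length rem le_rfl
    (PySem.Set.nodup_ofList _)
    (by intro u hu y hy
        exact (hremmem y).2 (hstep_end u y ((hadj u y).1 hy)))
  -- B-side partition
  have hinv0 : pvInv E [] [] := by
    refine ⟨by simp, by simp, by simp, by simp, ?_⟩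
    intro x
    simp [pvEnd]
  have hinv := pvInv_foldl E E [] [] hinv0 (fun p hp => hp)
  rw [List.nil_append] at hinv
  obtain ⟨i1, i2, i3, i4, i5⟩ := hinv
  have hdisjF : ∀ c ∈ comps, ∀ c' ∈ comps, c ≠ c' → ∀ x ∈ c, x ∉ c' := by
    have hsymR : Symmetric (fun b c : PySem.Set Int => ∀ x, x ∈ b → x ∉ c) := by
      intro b c h x hxc hxb
      exact h x hxb hxc
    intro c hc c' hc' hne x hx
    exact (i2.forall hsymR) hc hc' hne x hx
  have hpartB : pvIsPartition (fun a b => b ∈ g.getD a []) rem.toFinset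
      (comps.map List.toFinset) := by
    rw [hstep_eq]
    refine ⟨?_, ?_, ?_, ?_, ?_⟩
    · intro b hb
      obtain ⟨c, hc, rfl⟩ := List.mem_map.1 hb
      exact (List.toFinset_nonempty_iff c).2 (i1 c hc)
    · rw [List.pairwise_map]
      refine i2.imp_of_mem ?_
      intro c c' _ _ h x hx
      rw [List.mem_toFinset] at hx ⊢
      exact h x hx
    · intro b hb x hx y hy
      obtain ⟨c, hc, rfl⟩ := List.mem_map.1 hb
      rw [List.mem_toFinset] at hx hy
      exact i3 c hc x hx y hy
    · intro b hb x hx y hstp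
      obtain ⟨c, hc, rfl⟩ := List.mem_map.1 hb
      rw [List.mem_toFinset] at hx ⊢
      have hyedge : (x, y) ∈ E ∨ (y, x) ∈ E := hstp
      have hpair : ∃ c' ∈ comps, x ∈ c' ∧ y ∈ c' := by
        rcases hyedge with h | h
        · obtain ⟨c', hc', h1, h2⟩ := i4 (x, y) h
          exact ⟨c', hc', h1, h2⟩
        · obtain ⟨c', hc', h1, h2⟩ := i4 (y, x) h
          exact ⟨c', hc', h2, h1⟩
      obtain ⟨c', hc', hxc', hyc'⟩ := hpair
      by_cases hcc : c = c'
      · exact hcc ▸ hyc'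
      · exact absurd hxc' (hdisjF c hc c' hc' hcc x hx)
    · intro x
      rw [List.mem_toFinset]
      rw [hremmem x, ← i5 x]
      constructor
      · rintro ⟨c, hc, hxc⟩
        exact ⟨c.toFinset, List.mem_map.2 ⟨c, hc, rfl⟩, List.mem_toFinset.2 hxc⟩
      · rintro ⟨b, hb, hxb⟩
        obtain ⟨c, hc, rfl⟩ := List.mem_map.1 hb
        exact ⟨c, hc, List.mem_toFinset.1 hxb⟩
  have hlen := pvPartition_length_eq hpartA hpartB
  rw [hcntA, hlen, List.length_map]

-- ===== VERDICT (by name: the statement is the Claim_ definition above) =====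
theorem Two_Break_Distance_spec : Claim_equal_Two_Break_Distance := by
  intro P Q _
  unfold Spec_Two_Break_Distance Two_Break_Distance Two_Break_Distance_alt
  simp only []
  rw [pvMain P Q]
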